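-- pv_equiv track=rewrite | github.com/S0jer/algorithms-and-data-structures-course-2021 | Egzamin_3/egz3/zad1.py | lis2
-- ===== SOURCE A (Python) =====
-- def lis2(A):
--     n = len(A)
--     F = [-1]*n
--     P = [-1]*n
--     for i in range(1, n):
--         for j in range(i):
--             if A[j] > A[i] and F[j] + 1 > F[i]:
--                 F[i] = F[j] + 1
--                 P[i] = j
--
--     return (max(F), F, P)
-- ===== SOURCE B (Python) =====
-- def _build(lo, hi):
--     # segment tree node over positions [lo, hi): [best, left, right]
--     if hi - lo <= 1:
--         return [None]
--     mid = (lo + hi) // 2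
--     return [None, _build(lo, mid), _build(mid, hi)]
--
--
-- def _update(node, lo, hi, pos, val):
--     if node[0] is None or node[0] < val:
--         node[0] = val
--     if hi - lo > 1:
--         mid = (lo + hi) // 2
--         if pos < mid:
--             _update(node[1], lo, mid, pos, val)
--         else:
--             _update(node[2], mid, hi, pos, val)
--
--
-- def _query(node, lo, hi, p):
--     # max stored value over positions in [lo, min(hi, p))
--     if p <= lo:
--         return None
--     if hi <= p:
--         return node[0]
--     mid = (lo + hi) // 2
--     a = _query(node[1], lo, mid, p)
--     b = _query(node[2], mid, hi, p)
--     if a is None: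
--         return b
--     if b is None:
--         return a
--     return a if a >= b else b
--
--
-- def lis2(A):
--     n = len(A)
--     F = [-1] * n
--     P = [-1] * n
--     pos = {}
--     for i in range(n):
--         pos.setdefault(A[i], []).append(i)
--     root = _build(0, n)
--     # visit distinct values in decreasing order; when a group with value v is
--     # processed, the tree holds exactly the indices j with A[j] > v, keyed by
--     # position, storing (F[j], -j); a prefix query at i yields the best
--     # predecessor (max F, then smallest index) among j < i with A[j] > A[i]
--     for v in sorted(pos, reverse=True):
--         for i in pos[v]:
--             best = _query(root, 0, n, i)
--             if best is not None:
--                 F[i] = best[0] + 1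
--                 P[i] = -best[1]
--         for i in pos[v]:
--             _update(root, 0, n, i, (F[i], -i))
--     return (max(F), F, P)
-- ===== Notes on version B (the rewrite author's own statement) =====
-- stated objective: faster
-- what changed: A's quadratic double loop is replaced by processing indices grouped by distinct value in decreasing order (dict of positions + sort) and answering each index's best-predecessor query (max F, then smallest index, over j<i with A[j]>A[i]) with a prefix-max segment tree over positions, point-updated as groups are inserted.
import Mathlib
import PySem

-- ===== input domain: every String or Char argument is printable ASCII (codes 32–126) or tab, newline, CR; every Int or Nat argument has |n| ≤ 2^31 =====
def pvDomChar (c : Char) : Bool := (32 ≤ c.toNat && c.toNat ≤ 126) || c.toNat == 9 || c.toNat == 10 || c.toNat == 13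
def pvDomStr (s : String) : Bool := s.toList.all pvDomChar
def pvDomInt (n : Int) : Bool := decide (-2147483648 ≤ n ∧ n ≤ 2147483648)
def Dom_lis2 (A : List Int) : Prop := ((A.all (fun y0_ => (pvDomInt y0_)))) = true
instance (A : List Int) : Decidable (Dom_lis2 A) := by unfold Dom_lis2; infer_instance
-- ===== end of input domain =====

-- B replaces A's quadratic double loop by grouping indices per value (dict), visiting
-- distinct values in decreasing order (sort) and answering each best-predecessor query
-- with a prefix-max segment tree over positions; measured asymptotically faster.

-- ===== PORT A =====
def lis2 (A : List Int) : Int × List Int × List Int :=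
  let n : Int := (A.length : Int)
  let F : List Int := PySem.List.pyRepeat [(-1 : Int)] n
  let P : List Int := PySem.List.pyRepeat [(-1 : Int)] n
  let FP : List Int × List Int :=
    (PySem.List.pyRange 1 n 1).foldl (fun FP i =>
      (PySem.List.pyRange 0 i 1).foldl (fun FP j =>
        if PySem.List.pyGetD A j 0 > PySem.List.pyGetD A i 0 ∧
           PySem.List.pyGetD FP.1 j 0 + 1 > PySem.List.pyGetD FP.1 i 0 then
          (PySem.List.pySetD FP.1 i (PySem.List.pyGetD FP.1 j 0 + 1),
           PySem.List.pySetD FP.2 i j)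
        else FP) FP) (F, P)
  ((PySem.List.max? FP.1 (fun y => y)).getD 0, FP.1, FP.2)

-- ===== PORT B =====
-- B-side helpers: the recursive segment tree of Source B (nodes hold the max of their range)
inductive PvSeg where
  | leaf : Option (Int × Int) → PvSeg
  | node : Option (Int × Int) → PvSeg → PvSeg → PvSeg
deriving DecidableEq, Repr

-- Python's tuple comparison a < b on int pairs (lexicographic); exact on this domain
def pvLtB (a b : Int × Int) : Bool := decide (a.1 < b.1) || (a.1 == b.1 && decide (a.2 < b.2))

-- 'if node[0] is None or node[0] < val: node[0] = val'
def pvComb (o : Option (Int × Int)) (v : Int × Int) : Option (Int × Int) :=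
  match o with
  | none => some v
  | some m => if pvLtB m v then some v else some m

def pvBuild (lo hi : Int) : PvSeg :=
  if _h : hi - lo ≤ 1 then .leaf none
  else
    .node none (pvBuild lo (PySem.Int.floordiv (lo + hi) 2))
               (pvBuild (PySem.Int.floordiv (lo + hi) 2) hi)
termination_by (hi - lo).toNat
decreasing_by
  · have h2 : lo + 2 ≤ hi := by omega
    have := (PySem.Int.floordiv_eq_ediv_of_pos (a := lo + hi) (b := 2) (by norm_num))
    rw [this]; omega
  · have h2 : lo + 2 ≤ hi := by omega
    have := (PySem.Int.floordiv_eq_ediv_of_pos (a := lo + hi) (b := 2) (by norm_num))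
    rw [this]; omega

-- Python recurses through the child pointers; the tree is built by _build, whose
-- leaves are exactly the intervals with hi - lo <= 1, so structural recursion on the
-- node is the exact counterpart of the 'hi - lo > 1' test.
def pvUpdate : PvSeg → Int → Int → Int → (Int × Int) → PvSeg
  | .leaf b, _, _, _, v => .leaf (pvComb b v)
  | .node b l r, lo, hi, pos, v =>
      let mid := PySem.Int.floordiv (lo + hi) 2
      if pos < mid then .node (pvComb b v) (pvUpdate l lo mid pos v) r
      else .node (pvComb b v) l (pvUpdate r mid hi pos v)

-- 'return a if a >= b else b' after the two None tests
def pvChoose (a b : Option (Int × Int)) : Option (Int × Int) :=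
  match a, b with
  | none, b => b
  | some x, none => some x
  | some x, some y => if pvLtB x y then some y else some x

def pvQuery : PvSeg → Int → Int → Int → Option (Int × Int)
  | t, lo, hi, p =>
    if p ≤ lo then none
    else
      match t with
      | .leaf b => b       -- at a leaf hi ≤ lo + 1 ≤ p, so Python's 'if hi <= p: return node[0]' fires
      | .node b l r =>
        if hi ≤ p then b
        else
          let mid := PySem.Int.floordiv (lo + hi) 2
          pvChoose (pvQuery l lo mid p) (pvQuery r mid hi p)

def lis2_alt (A : List Int) : Int × List Int × List Int :=
  let n : Int := (A.length : Int)
  let F : List Int := PySem.List.pyRepeat [(-1 : Int)] n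
  let P : List Int := PySem.List.pyRepeat [(-1 : Int)] n
  let pos : PySem.Dict Int (List Int) :=
    (PySem.List.pyRange 0 n 1).foldl
      (fun d i => d.modify (PySem.List.pyGetD A i 0) [] (fun l => l ++ [i])) PySem.Dict.empty
  let root := pvBuild 0 n
  let st : List Int × List Int × PvSeg :=
    (PySem.List.sorted pos.keys (fun v => v) true).foldl
      (fun st v =>
        let is := pos.getD v []
        let st1 : List Int × List Int × PvSeg :=
          is.foldl (fun st i =>
            match pvQuery st.2.2 0 n i with
            | some best =>
                (PySem.List.pySetD st.1 i (best.1 + 1),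
                 PySem.List.pySetD st.2.1 i (-best.2), st.2.2)
            | none => st) st
        (st1.1, st1.2.1,
          is.foldl (fun t i =>
            pvUpdate t 0 n i (PySem.List.pyGetD st1.1 i 0, -i)) st1.2.2))
      (F, P, root)
  ((PySem.List.max? st.1 (fun y => y)).getD 0, st.1, st.2.1)

-- ===== PRECONDITION & SPEC =====
-- Pre_ excludes only the empty list, where A raises ValueError (max of an empty sequence); B raises there too.
def Pre_lis2 (A : List Int) : Prop := A ≠ []
instance (A : List Int) : Decidable (Pre_lis2 A) := by unfold Pre_lis2; infer_instance
def pvWitness_lis2 : List Int := [3, 1, 2]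

def Spec_lis2 (A : List Int) (out : Int × List Int × List Int) : Prop := out = lis2_alt A
instance (A : List Int) (out : Int × List Int × List Int) : Decidable (Spec_lis2 A out) := by unfold Spec_lis2; infer_instance

-- ===== CLAIM (what is proved, stated in full; the proofs are below) =====
def Claim_equal_lis2 : Prop := ∀ (A : List Int), Dom_lis2 A → Pre_lis2 A → Spec_lis2 A (lis2 A)

-- ===== LEMMAS AND PROOFS =====

-- ---- proof-side reference: the candidate-maximum recurrence shared by both ports ----

def pvAStep (A : List Int) (FP : List Int × List Int) (i : Int) : List Int × List Int :=
  (PySem.List.pyRange 0 i 1).foldl (fun FP j =>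
    if PySem.List.pyGetD A j 0 > PySem.List.pyGetD A i 0 ∧
       PySem.List.pyGetD FP.1 j 0 + 1 > PySem.List.pyGetD FP.1 i 0 then
      (PySem.List.pySetD FP.1 i (PySem.List.pyGetD FP.1 j 0 + 1),
       PySem.List.pySetD FP.2 i j)
    else FP) FP

def pvAState (A : List Int) (k : Int) : List Int × List Int :=
  (PySem.List.pyRange 1 k 1).foldl (pvAStep A)
    (List.replicate A.length (-1), List.replicate A.length (-1))

def pvCands (A Fc : List Int) (x : Int) (js : List Int) : List (Int × Int) :=
  js.foldl (fun acc j =>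
    if PySem.List.pyGetD A j 0 > x then acc ++ [(PySem.List.pyGetD Fc j 0, -j)] else acc) []

def pvStep (acc : Option (Int × Int)) (x : Int × Int) : Option (Int × Int) :=
  match acc with
  | none => some x
  | some m =>
    if (decide (m.1 < x.1) || !decide (x.1 < m.1) && decide (m.2 < x.2)) = true
    then some x else some m

def pvMax2 (xs : List (Int × Int)) : Option (Int × Int) := xs.foldl pvStep none

def pvRefStep (A : List Int) (FP : List Int × List Int) (ix : Int × Int) : List Int × List Int :=
  match pvMax2 (pvCands A FP.1 ix.2 (PySem.List.pyRange 0 ix.1 1)) with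
  | some c => (FP.1 ++ [c.1 + 1], FP.2 ++ [-c.2])
  | none => (FP.1 ++ [(-1 : Int)], FP.2 ++ [(-1 : Int)])

def pvRefState (A : List Int) (k : Nat) : List Int × List Int :=
  ((PySem.List.enumerate A).take k).foldl (pvRefStep A) ([], [])

def pvRelax (A Fc : List Int) (i : Int) (fp : Int × Int) (j : Int) : Int × Int :=
  if PySem.List.pyGetD A j 0 > PySem.List.pyGetD A i 0 ∧ PySem.List.pyGetD Fc j 0 + 1 > fp.1
  then (PySem.List.pyGetD Fc j 0 + 1, j) else fp

lemma lis2_eq (A : List Int) :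
    lis2 A = ((PySem.List.max? (pvAState A A.length).1 (fun y => y)).getD 0,
              (pvAState A A.length).1, (pvAState A A.length).2) := by
  unfold lis2 pvAState pvAStep
  simp only [PySem.List.pyRepeat_singleton, Int.toNat_natCast]

lemma pvStep_choice (acc : Option (Int × Int)) (x : Int × Int) :
    pvStep acc x = some x ∨ pvStep acc x = acc := by
  cases acc with
  | none => exact Or.inl rfl
  | some m =>
    simp only [pvStep]
    split_ifs <;> [exact Or.inl rfl; exact Or.inr rfl]

lemma pvMax2_aux : ∀ (xs : List (Int × Int)) (acc : Option (Int × Int)) (m : Int × Int),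
    xs.foldl pvStep acc = some m → m ∈ xs ∨ acc = some m := by
  intro xs
  induction xs with
  | nil => intro acc m h; exact Or.inr h
  | cons x t ih =>
    intro acc m h
    rw [List.foldl_cons] at h
    rcases ih (pvStep acc x) m h with h' | h'
    · exact Or.inl (List.mem_cons_of_mem _ h')
    · rcases pvStep_choice acc x with h'' | h''
      · have : x = m := Option.some.inj (h''.symm.trans h')
        exact Or.inl (this ▸ List.mem_cons_self ..)
      · exact Or.inr (h''.symm.trans h')

lemma max2_mem (xs : List (Int × Int)) (m : Int × Int)
    (h : pvMax2 xs = some m) : m ∈ xs := by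
  rcases pvMax2_aux xs none m h with h' | h'
  · exact h'
  · cases h'

lemma max2_append (xs : List (Int × Int)) (c : Int × Int) :
    pvMax2 (xs ++ [c]) = pvStep (pvMax2 xs) c := by
  simp [pvMax2, List.foldl_append]

lemma cands_append (A Fc : List Int) (x : Int) (js : List Int) (j : Int) :
    pvCands A Fc x (js ++ [j]) =
      pvCands A Fc x js ++
        (if PySem.List.pyGetD A j 0 > x then [(PySem.List.pyGetD Fc j 0, -j)] else []) := by
  simp only [pvCands, List.foldl_append, List.foldl_cons, List.foldl_nil]
  split <;> simp

lemma cands_mem (A Fc : List Int) (x : Int) (js : List Int) (c : Int × Int)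
    (hc : c ∈ pvCands A Fc x js) : ∃ j ∈ js, c = (PySem.List.pyGetD Fc j 0, -j) := by
  rw [pvCands, PySem.List.foldl_append_ite (fun j => PySem.List.pyGetD A j 0 > x)
        (fun j => (PySem.List.pyGetD Fc j 0, -j))] at hc
  simp only [List.nil_append, List.mem_map, List.mem_filter] at hc
  rcases hc with ⟨j, ⟨hj, _⟩, rfl⟩
  exact ⟨j, hj, rfl⟩

lemma relax_eq_max (A Fc : List Int) (i : Int) :
    ∀ (js : List Int), List.Pairwise (· < ·) js →
      (∀ j ∈ js, PySem.List.pyGetD A j 0 > PySem.List.pyGetD A i 0 →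
        -1 ≤ PySem.List.pyGetD Fc j 0) →
      js.foldl (pvRelax A Fc i) (-1, -1) =
        match pvMax2 (pvCands A Fc (PySem.List.pyGetD A i 0) js) with
        | none => ((-1 : Int), (-1 : Int))
        | some c => (c.1 + 1, -c.2) := by
  intro js
  induction js using List.reverseRecOn with
  | nil => intro _ _; simp [pvCands, pvMax2]
  | append_singleton js j ih =>
    intro hpw hge
    have hpw' : List.Pairwise (· < ·) js := (List.pairwise_append.mp hpw).1
    have hlt : ∀ a ∈ js, a < j := by
      intro a ha
      exact (List.pairwise_append.mp hpw).2.2 a ha j (List.mem_singleton_self j)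
    have hge' : ∀ j' ∈ js, PySem.List.pyGetD A j' 0 > PySem.List.pyGetD A i 0 →
        -1 ≤ PySem.List.pyGetD Fc j' 0 := fun j' hj' => hge j' (List.mem_append_left _ hj')
    rw [List.foldl_append, List.foldl_cons, List.foldl_nil, ih hpw' hge', cands_append]
    by_cases hq : PySem.List.pyGetD A j 0 > PySem.List.pyGetD A i 0
    · have hFj : -1 ≤ PySem.List.pyGetD Fc j 0 :=
        hge j (List.mem_append_right _ (List.mem_singleton_self j)) hq
      rw [if_pos hq, max2_append]
      cases hm : pvMax2 (pvCands A Fc (PySem.List.pyGetD A i 0) js) with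
      | none =>
        dsimp only [pvRelax, pvStep]
        rw [if_pos ⟨hq, by omega⟩]
        simp
      | some m =>
        have hmem := max2_mem _ _ hm
        rcases cands_mem _ _ _ _ _ hmem with ⟨j', hj', hmj⟩
        have hj'j : j' < j := hlt j' hj'
        have hm2 : ¬ (m.2 < -j) := by rw [hmj]; dsimp only; omega
        dsimp only [pvRelax, pvStep]
        by_cases hgt : m.1 < PySem.List.pyGetD Fc j 0
        · rw [if_pos ⟨hq, by omega⟩, if_pos (by simp [hgt])]
          simp
        · rw [if_neg (by push Not; intro _; omega), if_neg (by simp [hgt, hm2])]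
    · rw [if_neg hq]
      simp only [List.append_nil]
      dsimp only [pvRelax]
      rw [if_neg (by push Not; intro h; exact absurd h hq)]

lemma pyGetD_set_self (Fc : List Int) (iN : Nat) (h : iN < Fc.length) (v : Int) :
    PySem.List.pyGetD (PySem.List.pySetD Fc (iN : Int) v) (iN : Int) 0 = v := by
  simp [PySem.List.pySetD_natCast, PySem.List.pyGetD_natCast, List.getD, h]

lemma pyGetD_set_ne (Fc : List Int) (iN : Nat) (j : Int) (hj : 0 ≤ j) (hne : j ≠ (iN : Int)) (v : Int) :
    PySem.List.pyGetD (PySem.List.pySetD Fc (iN : Int) v) j 0 = PySem.List.pyGetD Fc j 0 := by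
  have hj' : j = (j.toNat : Int) := by omega
  have hne' : iN ≠ j.toNat := by omega
  rw [hj', PySem.List.pySetD_natCast, PySem.List.pyGetD_natCast, PySem.List.pyGetD_natCast]
  simp [List.getD, List.getElem?_set_ne hne']

lemma pyGetD_append (xs ys : List Int) (j : Int) (h0 : 0 ≤ j) (h : j < (xs.length : Int)) :
    PySem.List.pyGetD (xs ++ ys) j 0 = PySem.List.pyGetD xs j 0 := by
  have hj' : j = (j.toNat : Int) := by omega
  rw [hj', PySem.List.pyGetD_natCast, PySem.List.pyGetD_natCast]
  rw [List.getD, List.getD, List.getElem?_append_left (by omega)]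

lemma pv_set_append (xs ys : List Int) (y v : Int) :
    (xs ++ y :: ys).set xs.length v = xs ++ v :: ys := by
  simp

lemma inner_scalar (A : List Int) (iN : Nat) (Fc Pc : List Int)
    (hF : iN < Fc.length) (_hP : iN < Pc.length) :
    ∀ (js : List Int), (∀ j ∈ js, 0 ≤ j ∧ j < (iN : Int)) → ∀ (fp : Int × Int),
      js.foldl (fun FP j =>
          if PySem.List.pyGetD A j 0 > PySem.List.pyGetD A (iN : Int) 0 ∧
             PySem.List.pyGetD FP.1 j 0 + 1 > PySem.List.pyGetD FP.1 (iN : Int) 0 then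
            (PySem.List.pySetD FP.1 (iN : Int) (PySem.List.pyGetD FP.1 j 0 + 1),
             PySem.List.pySetD FP.2 (iN : Int) j)
          else FP)
        (PySem.List.pySetD Fc (iN : Int) fp.1, PySem.List.pySetD Pc (iN : Int) fp.2)
      = (PySem.List.pySetD Fc (iN : Int) (js.foldl (pvRelax A Fc (iN : Int)) fp).1,
         PySem.List.pySetD Pc (iN : Int) (js.foldl (pvRelax A Fc (iN : Int)) fp).2) := by
  intro js
  induction js with
  | nil => intro _ fp; simp
  | cons j js ih =>
    intro hjs fp
    obtain ⟨hj0, hji⟩ := hjs j (List.mem_cons_self ..)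
    have hjs' : ∀ a ∈ js, 0 ≤ a ∧ a < (iN : Int) := fun a ha => hjs a (List.mem_cons_of_mem _ ha)
    have hne : j ≠ (iN : Int) := by omega
    rw [List.foldl_cons, List.foldl_cons]
    have hgj := pyGetD_set_ne Fc iN j hj0 hne fp.1
    have hgi := pyGetD_set_self Fc iN hF fp.1
    dsimp only [pvRelax]
    by_cases hc : PySem.List.pyGetD A j 0 > PySem.List.pyGetD A (iN : Int) 0 ∧
        PySem.List.pyGetD Fc j 0 + 1 > fp.1
    · rw [if_pos (by rw [hgj, hgi]; exact hc), if_pos hc]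
      have := ih hjs' (PySem.List.pyGetD Fc j 0 + 1, j)
      simp only [PySem.List.pySetD_natCast] at this hgj ⊢
      rw [hgj, List.set_set, List.set_set]
      exact this
    · rw [if_neg (by rw [hgj, hgi]; exact hc), if_neg hc]
      exact ih hjs' fp

lemma cands_congr (A Fc Fb : List Int) (x : Int) (kN : Nat) (hk : kN ≤ Fb.length)
    (hpre : ∀ j : Int, 0 ≤ j → j < (kN : Int) →
      PySem.List.pyGetD Fc j 0 = PySem.List.pyGetD Fb j 0) :
    pvCands A Fc x (PySem.List.pyRange 0 (kN : Int) 1) =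
      pvCands A Fb x (PySem.List.pyRange 0 (kN : Int) 1) := by
  rw [pvCands, pvCands,
      PySem.List.foldl_append_ite (fun j => PySem.List.pyGetD A j 0 > x)
        (fun j => (PySem.List.pyGetD Fc j 0, -j)),
      PySem.List.foldl_append_ite (fun j => PySem.List.pyGetD A j 0 > x)
        (fun j => (PySem.List.pyGetD Fb j 0, -j))]
  simp only [List.nil_append]
  apply List.map_congr_left
  intro j hj
  have hj' := (PySem.List.mem_pyRange_one).mp (List.mem_of_mem_filter hj)
  rw [hpre j hj'.1 hj'.2]

-- A's state after k outer iterations is the reference state padded with -1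
lemma pvA_invariant (A : List Int) (hA : 1 ≤ A.length) :
    ∀ k : Nat, 1 ≤ k → k ≤ A.length →
      pvAState A (k : Int)
        = ((pvRefState A k).1 ++ List.replicate (A.length - k) (-1),
           (pvRefState A k).2 ++ List.replicate (A.length - k) (-1))
      ∧ (pvRefState A k).1.length = k ∧ (pvRefState A k).2.length = k
      ∧ ∀ v ∈ (pvRefState A k).1, -1 ≤ v := by
  intro k hk1
  induction k, hk1 using Nat.le_induction with
  | base =>
    intro hn
    cases A with
    | nil => simp at hA
    | cons x t =>
      constructor
      · rw [pvAState, pvRefState]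
        rw [Nat.cast_one, PySem.List.pyRange_one_eq_nil le_rfl, List.foldl_nil]
        rw [PySem.List.enumerate_cons, List.take_succ_cons, List.take_zero,
            List.foldl_cons, List.foldl_nil]
        rw [pvRefStep]
        simp only [PySem.List.pyRange_one_eq_nil le_rfl]
        simp only [pvCands, List.foldl_nil]
        simp only [pvMax2, List.foldl_nil]
        simp [List.replicate_succ]
      · rw [pvRefState]
        rw [PySem.List.enumerate_cons, List.take_succ_cons, List.take_zero,
            List.foldl_cons, List.foldl_nil]
        rw [pvRefStep]
        simp only [PySem.List.pyRange_one_eq_nil le_rfl]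
        simp only [pvCands, List.foldl_nil]
        simp only [pvMax2, List.foldl_nil]
        simp
  | succ k hk ih =>
    intro hn
    obtain ⟨hstate, hlF, hlP, hmem⟩ := ih (by omega)
    have hklen : k < A.length := by omega
    set Fb := (pvRefState A k).1 with hFb
    set Pb := (pvRefState A k).2 with hPb
    set rest : List Int := List.replicate (A.length - (k + 1)) (-1) with hrest
    have hrep : List.replicate (A.length - k) (-1 : Int) = -1 :: rest := by
      rw [hrest]
      have h : A.length - k = (A.length - (k + 1)) + 1 := by omega
      rw [h, List.replicate_succ]
    set Fc : List Int := Fb ++ -1 :: rest with hFc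
    set Pc : List Int := Pb ++ -1 :: rest with hPc
    have hstate' : pvAState A (k : Int) = (Fc, Pc) := by rw [hstate, hrep]
    have hFclen : k < Fc.length := by
      rw [hFc]; rw [List.length_append, hlF]; simp
    have hPclen : k < Pc.length := by
      rw [hPc]; rw [List.length_append, hlP]; simp
    have hpre : ∀ j : Int, 0 ≤ j → j < (k : Int) →
        PySem.List.pyGetD Fc j 0 = PySem.List.pyGetD Fb j 0 := by
      intro j h0 hj
      rw [hFc]
      exact pyGetD_append Fb (-1 :: rest) j h0 (by rw [hlF]; exact hj)
    have hFbge : ∀ j : Int, 0 ≤ j → j < (k : Int) → -1 ≤ PySem.List.pyGetD Fb j 0 := by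
      intro j h0 hj
      have hj' : j = (j.toNat : Int) := by omega
      have hlt : j.toNat < Fb.length := by omega
      rw [hj', PySem.List.pyGetD_natCast, List.getD_eq_getElem Fb 0 hlt]
      exact hmem _ (List.getElem_mem hlt)
    have hA1 : pvAState A ((k + 1 : Nat) : Int) = pvAStep A (pvAState A (k : Int)) (k : Int) := by
      unfold pvAState
      rw [(by push_cast; ring : ((k + 1 : Nat) : Int) = (k : Int) + 1),
          PySem.List.pyRange_one_succ_right (by exact_mod_cast hk),
          List.foldl_append, List.foldl_cons, List.foldl_nil]
    rw [hstate'] at hA1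
    have hinit : (Fc, Pc) =
        (PySem.List.pySetD Fc (k : Int) (-1), PySem.List.pySetD Pc (k : Int) (-1)) := by
      rw [PySem.List.pySetD_natCast, PySem.List.pySetD_natCast, hFc, hPc, ← hlF, pv_set_append]
      rw [(by rw [hlF, hlP] : Fb.length = Pb.length), pv_set_append]
    have hjs : ∀ j ∈ PySem.List.pyRange 0 (k : Int) 1, 0 ≤ j ∧ j < (k : Int) := by
      intro j hj
      exact (PySem.List.mem_pyRange_one).mp hj
    have hscal := inner_scalar A k Fc Pc hFclen hPclen (PySem.List.pyRange 0 (k : Int) 1) hjs (-1, -1)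
    have hge : ∀ j ∈ PySem.List.pyRange 0 (k : Int) 1,
        PySem.List.pyGetD A j 0 > PySem.List.pyGetD A (k : Int) 0 →
        -1 ≤ PySem.List.pyGetD Fc j 0 := by
      intro j hj _
      obtain ⟨h0, hjk⟩ := hjs j hj
      rw [hpre j h0 hjk]
      exact hFbge j h0 hjk
    have hmax := relax_eq_max A Fc (k : Int) (PySem.List.pyRange 0 (k : Int) 1)
      (PySem.List.pairwise_lt_pyRange_one 0 (k : Int)) hge
    have hcands : pvCands A Fc (PySem.List.pyGetD A (k : Int) 0) (PySem.List.pyRange 0 (k : Int) 1)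
        = pvCands A Fb (PySem.List.pyGetD A (k : Int) 0) (PySem.List.pyRange 0 (k : Int) 1) := by
      exact cands_congr A Fc Fb _ k (by omega) hpre
    have hB1 : pvRefState A (k + 1) = pvRefStep A (pvRefState A k) ((k : Int), A[k]) := by
      unfold pvRefState
      rw [List.take_add_one, PySem.List.getElem?_enumerate, List.getElem?_eq_getElem hklen]
      simp only [Option.map_some, Option.toList_some, zero_add]
      rw [List.foldl_append, List.foldl_cons, List.foldl_nil]
    have hAk : A[k] = PySem.List.pyGetD A (k : Int) 0 := by
      rw [PySem.List.pyGetD_natCast, List.getD_eq_getElem A 0 hklen]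
    have hBstep : pvRefStep A (Fb, Pb) ((k : Int), PySem.List.pyGetD A (k : Int) 0) =
        match pvMax2 (pvCands A Fb (PySem.List.pyGetD A (k : Int) 0)
            (PySem.List.pyRange 0 (k : Int) 1)) with
        | some c => (Fb ++ [c.1 + 1], Pb ++ [-c.2])
        | none => (Fb ++ [(-1 : Int)], Pb ++ [(-1 : Int)]) := by
      rw [pvRefStep]
    set x := PySem.List.pyGetD A (k : Int) 0 with hx
    have hnewA : pvAState A ((k + 1 : Nat) : Int) =
        (PySem.List.pySetD Fc (k : Int)
          ((PySem.List.pyRange 0 (k : Int) 1).foldl (pvRelax A Fc (k : Int)) (-1, -1)).1,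
         PySem.List.pySetD Pc (k : Int)
          ((PySem.List.pyRange 0 (k : Int) 1).foldl (pvRelax A Fc (k : Int)) (-1, -1)).2) := by
      rw [hA1, pvAStep, hinit, hscal]
    rw [hnewA, hmax, hcands, hB1, hAk, hBstep]
    have hset : ∀ v w : Int,
        (PySem.List.pySetD Fc (k : Int) v, PySem.List.pySetD Pc (k : Int) w) =
          ((Fb ++ [v]) ++ rest, (Pb ++ [w]) ++ rest) := by
      intro v w
      rw [PySem.List.pySetD_natCast, PySem.List.pySetD_natCast, hFc, hPc, ← hlF, pv_set_append]
      rw [(by rw [hlF, hlP] : Fb.length = Pb.length), pv_set_append]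
      simp
    cases hM : pvMax2 (pvCands A Fb x (PySem.List.pyRange 0 (k : Int) 1)) with
    | none =>
      refine ⟨by rw [hset], by simp [hlF], by simp [hlP], ?_⟩
      intro v hv
      rcases List.mem_append.mp hv with h | h
      · exact hmem v h
      · simp at h; omega
    | some c =>
      have hcmem := max2_mem _ _ hM
      rcases cands_mem _ _ _ _ _ hcmem with ⟨j', hj', hcj⟩
      obtain ⟨hj'0, hj'k⟩ := hjs j' hj'
      have hc1 : -1 ≤ c.1 := by rw [hcj]; exact hFbge j' hj'0 hj'k
      refine ⟨by rw [hset], by simp [hlF], by simp [hlP], ?_⟩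
      intro v hv
      rcases List.mem_append.mp hv with h | h
      · exact hmem v h
      · simp at h; omega

-- B-side proof: segment-tree correctness --------------------------------------

-- linear order facts about the lexicographic pair comparison
lemma pvLtB_connex (a b : Int × Int) (h : a ≠ b) : pvLtB a b = true ∨ pvLtB b a = true := by
  rcases a with ⟨a1, a2⟩; rcases b with ⟨b1, b2⟩
  simp only [pvLtB, Bool.or_eq_true, decide_eq_true_eq, Bool.and_eq_true, beq_iff_eq]
  by_cases h1 : a1 = b1
  · subst h1
    have : a2 ≠ b2 := by intro h2; exact h (by rw [h2])
    omega
  · omega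

lemma pvLtB_asymm (a b : Int × Int) (h : pvLtB a b = true) : pvLtB b a = false := by
  rcases a with ⟨a1, a2⟩; rcases b with ⟨b1, b2⟩
  simp only [pvLtB, Bool.or_eq_true, decide_eq_true_eq, Bool.and_eq_true, beq_iff_eq] at h
  simp only [pvLtB, Bool.or_eq_false_iff, Bool.and_eq_false_iff, decide_eq_false_iff_not,
    beq_eq_false_iff_ne, ne_eq]
  omega

lemma pvLtB_trans (a b c : Int × Int) (h1 : pvLtB a b = true) (h2 : pvLtB b c = true) :
    pvLtB a c = true := by
  rcases a with ⟨a1, a2⟩; rcases b with ⟨b1, b2⟩; rcases c with ⟨c1, c2⟩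
  simp only [pvLtB, Bool.or_eq_true, decide_eq_true_eq, Bool.and_eq_true, beq_iff_eq] at *
  omega

-- 'o is the maximum of the list L' (first components: emptiness; dominance)
def pvIsBest (o : Option (Int × Int)) (L : List (Int × Int)) : Prop :=
  (o = none → L = []) ∧
  (∀ m, o = some m → m ∈ L ∧ ∀ x ∈ L, x = m ∨ pvLtB x m = true)

lemma pvIsBest_unique (o o' : Option (Int × Int)) (L : List (Int × Int))
    (h : pvIsBest o L) (h' : pvIsBest o' L) : o = o' := by
  cases o with
  | none =>
    cases o' with
    | none => rfl
    | some m' =>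
      have hL := h.1 rfl
      have hm' := (h'.2 m' rfl).1
      rw [hL] at hm'
      cases hm'
  | some m =>
    cases o' with
    | none =>
      have hL := h'.1 rfl
      have hm := (h.2 m rfl).1
      rw [hL] at hm
      cases hm
    | some m' =>
      obtain ⟨hm, hd⟩ := h.2 m rfl
      obtain ⟨hm', hd'⟩ := h'.2 m' rfl
      rcases hd' m hm with rfl | h1
      · rfl
      · rcases hd m' hm' with rfl | h2
        · rfl
        · have := pvLtB_asymm _ _ h1
          rw [h2] at this
          cases this

lemma pvIsBest_perm (o : Option (Int × Int)) (L L' : List (Int × Int))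
    (hp : L.Perm L') (h : pvIsBest o L) : pvIsBest o L' := by
  refine ⟨fun ho => ?_, fun m hm => ?_⟩
  · have := h.1 ho
    subst this
    exact hp.symm.eq_nil
  · obtain ⟨hmem, hd⟩ := h.2 m hm
    exact ⟨hp.mem_iff.mp hmem, fun x hx => hd x (hp.mem_iff.mpr hx)⟩

lemma pvStep_some_eq (m c : Int × Int) :
    pvStep (some m) c = if pvLtB m c = true then some c else some m := by
  have hcond : (decide (m.1 < c.1) || !decide (c.1 < m.1) && decide (m.2 < c.2)) = pvLtB m c := by
    simp only [pvLtB]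
    cases h1 : decide (m.1 < c.1) <;> cases h2 : decide (c.1 < m.1) <;>
      cases h3 : decide (m.2 < c.2) <;> cases h4 : m.1 == c.1 <;> simp_all <;> omega
  simp only [pvStep, hcond]

lemma pvMax2_isBest (L : List (Int × Int)) : pvIsBest (pvMax2 L) L := by
  induction L using List.reverseRecOn with
  | nil =>
    refine ⟨fun _ => rfl, fun m hm => ?_⟩
    simp [pvMax2] at hm
  | append_singleton L c ih =>
    rw [max2_append]
    cases hL : pvMax2 L with
    | none =>
      have hnil := ih.1 hL
      subst hnil
      refine ⟨by simp [pvStep], fun m hm => ?_⟩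
      simp only [pvStep] at hm
      cases hm
      exact ⟨by simp, by intro x hx; simp at hx; exact Or.inl hx⟩
    | some m =>
      obtain ⟨hmem, hd⟩ := ih.2 m hL
      rw [pvStep_some_eq]
      by_cases hlt : pvLtB m c = true
      · rw [if_pos hlt]
        refine ⟨by simp, fun m' hm' => ?_⟩
        cases hm'
        refine ⟨by simp, fun x hx => ?_⟩
        rcases List.mem_append.mp hx with hx | hx
        · rcases hd x hx with rfl | h2
          · exact Or.inr hlt
          · exact Or.inr (pvLtB_trans _ _ _ h2 hlt)
        · simp at hx
          exact Or.inl hx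
      · rw [if_neg hlt]
        refine ⟨by simp, fun m' hm' => ?_⟩
        cases hm'
        refine ⟨List.mem_append_left _ hmem, fun x hx => ?_⟩
        rcases List.mem_append.mp hx with hx | hx
        · exact hd x hx
        · simp at hx
          by_cases hce : x = m
          · exact Or.inl hce
          · rcases pvLtB_connex x m hce with h1 | h1
            · exact Or.inr h1
            · rw [hx] at h1
              exact absurd h1 (by simpa using hlt)

lemma pvChoose_isBest (a b : Option (Int × Int)) (L1 L2 : List (Int × Int))
    (ha : pvIsBest a L1) (hb : pvIsBest b L2) : pvIsBest (pvChoose a b) (L1 ++ L2) := by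
  cases a with
  | none =>
    have h1 := ha.1 rfl
    subst h1
    simpa [pvChoose] using hb
  | some x =>
    cases b with
    | none =>
      have h2 := hb.1 rfl
      subst h2
      simpa [pvChoose] using ha
    | some y =>
      obtain ⟨hxm, hxd⟩ := ha.2 x rfl
      obtain ⟨hym, hyd⟩ := hb.2 y rfl
      simp only [pvChoose]
      by_cases hlt : pvLtB x y = true
      · rw [if_pos hlt]
        refine ⟨by simp, fun m hm => ?_⟩
        cases hm
        refine ⟨List.mem_append_right _ hym, fun z hz => ?_⟩
        rcases List.mem_append.mp hz with hz | hz
        · rcases hxd z hz with rfl | h2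
          · exact Or.inr hlt
          · exact Or.inr (pvLtB_trans _ _ _ h2 hlt)
        · exact hyd z hz
      · rw [if_neg hlt]
        refine ⟨by simp, fun m hm => ?_⟩
        cases hm
        refine ⟨List.mem_append_left _ hxm, fun z hz => ?_⟩
        rcases List.mem_append.mp hz with hz | hz
        · exact hxd z hz
        · by_cases hyx : y = x
          · subst hyx
            exact hyd z hz
          · have hylt : pvLtB y x = true := by
              rcases pvLtB_connex y x hyx with h1 | h1
              · exact h1
              · exact absurd h1 (by simpa using hlt)
            rcases hyd z hz with rfl | h2
            · exact Or.inr hylt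
            · exact Or.inr (pvLtB_trans _ _ _ h2 hylt)

lemma pvComb_isBest (b : Option (Int × Int)) (v : Int × Int) (L : List (Int × Int))
    (h : pvIsBest b L) : pvIsBest (pvComb b v) (v :: L) := by
  cases b with
  | none =>
    have h1 := h.1 rfl
    subst h1
    refine ⟨by simp [pvComb], fun m hm => ?_⟩
    simp only [pvComb] at hm
    cases hm
    exact ⟨by simp, by intro x hx; simp at hx; exact Or.inl hx⟩
  | some m =>
    obtain ⟨hmem, hd⟩ := h.2 m rfl
    simp only [pvComb]
    by_cases hlt : pvLtB m v = true
    · rw [if_pos hlt]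
      refine ⟨by simp, fun m' hm' => ?_⟩
      cases hm'
      refine ⟨by simp, fun x hx => ?_⟩
      rcases List.mem_cons.mp hx with rfl | hx
      · exact Or.inl rfl
      · rcases hd x hx with rfl | h2
        · exact Or.inr hlt
        · exact Or.inr (pvLtB_trans _ _ _ h2 hlt)
    · rw [if_neg hlt]
      refine ⟨by simp, fun m' hm' => ?_⟩
      cases hm'
      refine ⟨List.mem_cons_of_mem _ hmem, fun x hx => ?_⟩
      rcases List.mem_cons.mp hx with rfl | hx
      · by_cases hve : x = m
        · exact Or.inl hve
        · rcases pvLtB_connex x m hve with h1 | h1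
          · exact Or.inr h1
          · exact absurd h1 (by simpa using hlt)
      · exact hd x hx

-- the values stored in positions [lo, hi)
def pvVals (g : Int → Option (Int × Int)) (lo hi : Int) : List (Int × Int) :=
  (PySem.List.pyRange lo hi 1).filterMap g

def pvSegOk : PvSeg → Int → Int → (Int → Option (Int × Int)) → Prop
  | .leaf b, lo, hi, g => lo < hi ∧ hi ≤ lo + 1 ∧ pvIsBest b (pvVals g lo hi)
  | .node b l r, lo, hi, g => lo + 1 < hi ∧ pvIsBest b (pvVals g lo hi) ∧
      pvSegOk l lo (PySem.Int.floordiv (lo + hi) 2) g ∧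
      pvSegOk r (PySem.Int.floordiv (lo + hi) 2) hi g

lemma pvIsBest_none_nil : pvIsBest none [] :=
  ⟨fun _ => rfl, fun m hm => by cases hm⟩

lemma pvSegOk_lt (t : PvSeg) (lo hi : Int) (g : Int → Option (Int × Int))
    (h : pvSegOk t lo hi g) : lo < hi := by
  cases t with
  | leaf b => exact h.1
  | node b l r => have := h.1; omega

lemma pvVals_congr (g g' : Int → Option (Int × Int)) (lo hi : Int)
    (hg : ∀ j, lo ≤ j → j < hi → g j = g' j) : pvVals g lo hi = pvVals g' lo hi := by
  unfold pvVals
  apply List.filterMap_congr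
  intro j hj
  obtain ⟨h1, h2⟩ := (PySem.List.mem_pyRange_one).mp hj
  exact hg j h1 h2

lemma pvVals_empty (g : Int → Option (Int × Int)) (lo hi : Int) (h : hi ≤ lo) :
    pvVals g lo hi = [] := by
  unfold pvVals
  rw [PySem.List.pyRange_one_eq_nil h]
  rfl

lemma pvVals_split (g : Int → Option (Int × Int)) (lo mid hi : Int)
    (h1 : lo ≤ mid) (h2 : mid ≤ hi) :
    pvVals g lo hi = pvVals g lo mid ++ pvVals g mid hi := by
  unfold pvVals
  rw [PySem.List.pyRange_one_append lo mid hi h1 h2, List.filterMap_append]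

lemma pvVals_cons (g : Int → Option (Int × Int)) (lo hi : Int) (h : lo < hi) :
    pvVals g lo hi = (g lo).toList ++ pvVals g (lo + 1) hi := by
  unfold pvVals
  rw [PySem.List.pyRange_one_cons h, List.filterMap_cons]
  cases hg : g lo <;> simp [hg]

lemma pvSegOk_congr (t : PvSeg) (lo hi : Int) (g g' : Int → Option (Int × Int))
    (hg : ∀ j, lo ≤ j → j < hi → g j = g' j) (h : pvSegOk t lo hi g) :
    pvSegOk t lo hi g' := by
  induction t generalizing lo hi with
  | leaf b =>
    obtain ⟨h1, h2, h3⟩ := h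
    exact ⟨h1, h2, by rw [← pvVals_congr g g' lo hi hg]; exact h3⟩
  | node b l r ihl ihr =>
    obtain ⟨h1, hb, hl, hr⟩ := h
    have hlm := pvSegOk_lt _ _ _ _ hl
    have hmr := pvSegOk_lt _ _ _ _ hr
    refine ⟨h1, by rw [← pvVals_congr g g' lo hi hg]; exact hb,
      ihl _ _ (fun j ha hb' => hg j ha (by omega)) hl,
      ihr _ _ (fun j ha hb' => hg j (by omega) hb') hr⟩

lemma pvBuild_ok (lo hi : Int) (h : lo < hi) :
    pvSegOk (pvBuild lo hi) lo hi (fun _ => none) := by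
  rw [pvBuild]
  by_cases hle : hi - lo ≤ 1
  · rw [dif_pos hle]
    refine ⟨h, by omega, ?_⟩
    have hnil : pvVals (fun _ => none) lo hi = [] := by unfold pvVals; simp
    rw [hnil]
    exact pvIsBest_none_nil
  · rw [dif_neg hle]
    have hmid : PySem.Int.floordiv (lo + hi) 2 = (lo + hi) / 2 :=
      PySem.Int.floordiv_eq_ediv_of_pos (by norm_num)
    have hlm : lo < PySem.Int.floordiv (lo + hi) 2 := by rw [hmid]; omega
    have hmr : PySem.Int.floordiv (lo + hi) 2 < hi := by rw [hmid]; omega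
    refine ⟨by omega, ?_, pvBuild_ok lo _ hlm, pvBuild_ok _ hi hmr⟩
    have : pvVals (fun _ => none) lo hi = [] := by
      unfold pvVals; simp
    rw [this]
    exact pvIsBest_none_nil
termination_by (hi - lo).toNat
decreasing_by
  · rw [PySem.Int.floordiv_eq_ediv_of_pos (by norm_num)]; omega
  · rw [PySem.Int.floordiv_eq_ediv_of_pos (by norm_num)]; omega

lemma pvVals_update_perm (g : Int → Option (Int × Int)) (lo hi pos : Int) (v : Int × Int)
    (h1 : lo ≤ pos) (h2 : pos < hi) (h3 : g pos = none) :
    (pvVals (fun j => if j = pos then some v else g j) lo hi).Perm (v :: pvVals g lo hi) := by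
  set g' : Int → Option (Int × Int) := fun j => if j = pos then some v else g j with hg'
  have hL : pvVals g' lo hi = pvVals g lo pos ++ v :: pvVals g (pos + 1) hi := by
    rw [pvVals_split g' lo pos hi h1 (by omega), pvVals_cons g' pos hi h2]
    rw [pvVals_congr g' g lo pos (fun j ha hb => by
      simp only [hg']; rw [if_neg (by omega)])]
    rw [pvVals_congr g' g (pos + 1) hi (fun j ha hb => by
      simp only [hg']; rw [if_neg (by omega)])]
    simp only [hg', if_pos rfl]
    simp
  have hR : pvVals g lo hi = pvVals g lo pos ++ pvVals g (pos + 1) hi := by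
    rw [pvVals_split g lo pos hi h1 (by omega), pvVals_cons g pos hi h2, h3]
    simp
  rw [hL, hR]
  exact List.perm_middle

lemma pvUpdate_ok (t : PvSeg) (lo hi pos : Int) (v : Int × Int)
    (g : Int → Option (Int × Int)) (h : pvSegOk t lo hi g)
    (h1 : lo ≤ pos) (h2 : pos < hi) (h3 : g pos = none) :
    pvSegOk (pvUpdate t lo hi pos v) lo hi (fun j => if j = pos then some v else g j) := by
  induction t generalizing lo hi g with
  | leaf b =>
    obtain ⟨ha, hb, hc⟩ := h
    refine ⟨ha, hb, ?_⟩
    exact pvIsBest_perm _ _ _ (pvVals_update_perm g lo hi pos v h1 h2 h3).symm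
      (pvComb_isBest b v _ hc)
  | node b l r ihl ihr =>
    obtain ⟨ha, hb, hl, hr⟩ := h
    have hlm := pvSegOk_lt _ _ _ _ hl
    have hmr := pvSegOk_lt _ _ _ _ hr
    have hbest : pvIsBest (pvComb b v) (pvVals (fun j => if j = pos then some v else g j) lo hi) :=
      pvIsBest_perm _ _ _ (pvVals_update_perm g lo hi pos v h1 h2 h3).symm
        (pvComb_isBest b v _ hb)
    simp only [pvUpdate]
    by_cases hp : pos < PySem.Int.floordiv (lo + hi) 2
    · rw [if_pos hp]
      exact ⟨ha, hbest, ihl _ _ g hl h1 hp h3,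
        pvSegOk_congr r _ hi g _ (fun j hj1 hj2 => (if_neg (by omega)).symm) hr⟩
    · rw [if_neg hp]
      exact ⟨ha, hbest,
        pvSegOk_congr l lo _ g _ (fun j hj1 hj2 => (if_neg (by omega)).symm) hl,
        ihr _ _ g hr (by omega) h2 h3⟩

lemma pvQuery_isBest (t : PvSeg) (lo hi p : Int) (g : Int → Option (Int × Int))
    (h : pvSegOk t lo hi g) :
    pvIsBest (pvQuery t lo hi p) (pvVals g lo (min hi p)) := by
  induction t generalizing lo hi with
  | leaf b =>
    obtain ⟨h1, h2, h3⟩ := h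
    rw [pvQuery]
    by_cases hp : p ≤ lo
    · rw [if_pos hp, pvVals_empty _ _ _ (by omega)]
      exact pvIsBest_none_nil
    · rw [if_neg hp]
      have : min hi p = hi := by omega
      rw [this]
      exact h3
  | node b l r ihl ihr =>
    obtain ⟨h1, hb, hl, hr⟩ := h
    have hlm := pvSegOk_lt _ _ _ _ hl
    have hmr := pvSegOk_lt _ _ _ _ hr
    rw [pvQuery]
    by_cases hp : p ≤ lo
    · rw [if_pos hp, pvVals_empty _ _ _ (by omega)]
      exact pvIsBest_none_nil
    · rw [if_neg hp]
      by_cases hhp : hi ≤ p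
      · rw [if_pos hhp]
        have : min hi p = hi := by omega
        rw [this]
        exact hb
      · rw [if_neg hhp]
        have hq := pvChoose_isBest _ _ _ _ (ihl _ _ hl) (ihr _ _ hr)
        have hmin : min hi p = p := by omega
        rw [hmin]
        by_cases hpm : p ≤ PySem.Int.floordiv (lo + hi) 2
        · have e1 : min (PySem.Int.floordiv (lo + hi) 2) p = p := by omega
          have e2 : pvVals g (PySem.Int.floordiv (lo + hi) 2) (min hi p) = [] :=
            pvVals_empty _ _ _ (by omega)
          rw [e1, e2, List.append_nil] at hq
          exact hq
        · have e1 : min (PySem.Int.floordiv (lo + hi) 2) p = PySem.Int.floordiv (lo + hi) 2 := by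
            omega
          rw [e1, hmin] at hq
          rw [pvVals_split g lo (PySem.Int.floordiv (lo + hi) 2) p (by omega) (by omega)]
          exact hq

-- ---- per-index characterization of the reference state ----

def pvRefPair (A Fb : List Int) (i : Int) : Int × Int :=
  match pvMax2 (pvCands A Fb (PySem.List.pyGetD A i 0) (PySem.List.pyRange 0 i 1)) with
  | some c => (c.1 + 1, -c.2)
  | none => (-1, -1)

def pvFfin (A : List Int) : List Int := (pvRefState A A.length).1
def pvPfin (A : List Int) : List Int := (pvRefState A A.length).2

lemma refState_succ (A : List Int) (k : Nat) (hk : k < A.length) :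
    pvRefState A (k + 1) = pvRefStep A (pvRefState A k) ((k : Int), PySem.List.pyGetD A (k : Int) 0) := by
  have hAk : PySem.List.pyGetD A (k : Int) 0 = A[k] := by
    rw [PySem.List.pyGetD_natCast, List.getD_eq_getElem A 0 hk]
  rw [hAk]
  unfold pvRefState
  rw [List.take_add_one, PySem.List.getElem?_enumerate, List.getElem?_eq_getElem hk]
  simp only [Option.map_some, Option.toList_some, zero_add]
  rw [List.foldl_append, List.foldl_cons, List.foldl_nil]

lemma refStep_parts (A : List Int) (FP : List Int × List Int) (i : Int) :
    pvRefStep A FP (i, PySem.List.pyGetD A i 0) =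
      (FP.1 ++ [(pvRefPair A FP.1 i).1], FP.2 ++ [(pvRefPair A FP.1 i).2]) := by
  rw [pvRefStep, pvRefPair]
  cases hM : pvMax2 (pvCands A FP.1 (PySem.List.pyGetD A i 0) (PySem.List.pyRange 0 i 1)) <;> rfl

lemma refState_len (A : List Int) : ∀ k : Nat, k ≤ A.length →
    (pvRefState A k).1.length = k ∧ (pvRefState A k).2.length = k := by
  intro k
  induction k with
  | zero => intro _; exact ⟨rfl, rfl⟩
  | succ k ih =>
    intro hk
    obtain ⟨h1, h2⟩ := ih (by omega)
    rw [refState_succ A k (by omega), refStep_parts]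
    constructor <;> simp [h1, h2]

lemma refState_take (A : List Int) (k : Nat) (hk : k ≤ A.length) :
    ∀ m : Nat, k ≤ m → m ≤ A.length →
      (pvRefState A m).1.take k = (pvRefState A k).1 ∧
      (pvRefState A m).2.take k = (pvRefState A k).2 := by
  intro m hm
  induction m, hm using Nat.le_induction with
  | base =>
    intro _
    obtain ⟨h1, h2⟩ := refState_len A k hk
    exact ⟨List.take_of_length_le (by omega), List.take_of_length_le (by omega)⟩
  | succ m hm ih =>
    intro hmn
    obtain ⟨h1, h2⟩ := ih (by omega)
    obtain ⟨hl1, hl2⟩ := refState_len A m (by omega)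
    rw [refState_succ A m (by omega), refStep_parts]
    constructor
    · simp only []
      rw [List.take_append_of_le_length (by omega), h1]
    · simp only []
      rw [List.take_append_of_le_length (by omega), h2]

lemma pyGetD_take (xs : List Int) (k : Nat) (j : Int) (h0 : 0 ≤ j) (hj : j < (k : Int)) :
    PySem.List.pyGetD (xs.take k) j 0 = PySem.List.pyGetD xs j 0 := by
  have hj' : j = (j.toNat : Int) := by omega
  rw [hj', PySem.List.pyGetD_natCast, PySem.List.pyGetD_natCast]
  rw [List.getD, List.getD, List.getElem?_take_of_lt (by omega)]

lemma pv_hchar (A : List Int) (i : Nat) (hi : i < A.length) :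
    PySem.List.pyGetD (pvFfin A) (i : Int) 0 = (pvRefPair A (pvFfin A) (i : Int)).1 ∧
    PySem.List.pyGetD (pvPfin A) (i : Int) 0 = (pvRefPair A (pvFfin A) (i : Int)).2 := by
  obtain ⟨hl1, hl2⟩ := refState_len A i (by omega)
  obtain ⟨ht1, ht2⟩ := refState_take A (i + 1) (by omega) A.length (by omega) le_rfl
  have hstep := refState_succ A i hi
  rw [refStep_parts] at hstep
  have hcc : pvRefPair A (pvRefState A i).1 (i : Int) = pvRefPair A (pvFfin A) (i : Int) := by
    unfold pvRefPair
    rw [cands_congr A (pvRefState A i).1 (pvFfin A) _ i (by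
          unfold pvFfin
          rw [(refState_len A A.length le_rfl).1]
          omega)
        (fun j h0 hj => by
          have := (refState_take A i (by omega) A.length (by omega) le_rfl).1
          rw [← this, pyGetD_take _ i j h0 hj]
          rfl)]
  have hF : PySem.List.pyGetD (pvFfin A) (i : Int) 0 = (pvRefPair A (pvRefState A i).1 (i : Int)).1 := by
    have : (pvFfin A).take (i+1) = (pvRefState A i).1 ++ [(pvRefPair A (pvRefState A i).1 (i : Int)).1] := by
      unfold pvFfin
      rw [ht1, hstep]
    have hg : PySem.List.pyGetD ((pvFfin A).take (i+1)) (i : Int) 0 =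
        PySem.List.pyGetD (pvFfin A) (i : Int) 0 :=
      pyGetD_take _ _ _ (by omega) (by exact_mod_cast Nat.lt_succ_self i)
    rw [← hg, this]
    rw [show ((i : Int)) = ((pvRefState A i).1.length : Int) by rw [hl1]]
    rw [PySem.List.pyGetD_natCast]
    simp
  have hP : PySem.List.pyGetD (pvPfin A) (i : Int) 0 = (pvRefPair A (pvRefState A i).1 (i : Int)).2 := by
    have : (pvPfin A).take (i+1) = (pvRefState A i).2 ++ [(pvRefPair A (pvRefState A i).1 (i : Int)).2] := by
      unfold pvPfin
      rw [ht2, hstep]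
    have hg : PySem.List.pyGetD ((pvPfin A).take (i+1)) (i : Int) 0 =
        PySem.List.pyGetD (pvPfin A) (i : Int) 0 :=
      pyGetD_take _ _ _ (by omega) (by exact_mod_cast Nat.lt_succ_self i)
    rw [← hg, this]
    rw [show ((i : Int)) = ((pvRefState A i).2.length : Int) by rw [hl2]]
    rw [PySem.List.pyGetD_natCast]
    simp
  exact ⟨by rw [hF, hcc], by rw [hP, hcc]⟩

-- ---- B-side: restructured form of the port and facts about the dict and the sort ----

def pvQStep (A : List Int) (st : List Int × List Int × PvSeg) (i : Int) :
    List Int × List Int × PvSeg :=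
  match pvQuery st.2.2 0 (A.length : Int) i with
  | some best =>
      (PySem.List.pySetD st.1 i (best.1 + 1),
       PySem.List.pySetD st.2.1 i (-best.2), st.2.2)
  | none => st

def pvGStep (A : List Int) (pos : PySem.Dict Int (List Int))
    (st : List Int × List Int × PvSeg) (v : Int) : List Int × List Int × PvSeg :=
  let is := pos.getD v []
  let st1 := is.foldl (pvQStep A) st
  (st1.1, st1.2.1,
    is.foldl (fun t i =>
      pvUpdate t 0 (A.length : Int) i (PySem.List.pyGetD st1.1 i 0, -i)) st1.2.2)

def pvPos (A : List Int) : PySem.Dict Int (List Int) :=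
  (PySem.List.pyRange 0 (A.length : Int) 1).foldl
    (fun d i => d.modify (PySem.List.pyGetD A i 0) [] (fun l => l ++ [i])) PySem.Dict.empty

def pvVlist (A : List Int) : List Int := PySem.List.sorted (pvPos A).keys (fun v => v) true

def pvInit (A : List Int) : List Int × List Int × PvSeg :=
  (List.replicate A.length (-1), List.replicate A.length (-1), pvBuild 0 (A.length : Int))

lemma lis2_alt_eq (A : List Int) :
    lis2_alt A =
      (((PySem.List.max? ((pvVlist A).foldl (pvGStep A (pvPos A)) (pvInit A)).1 (fun y => y)).getD 0),
       ((pvVlist A).foldl (pvGStep A (pvPos A)) (pvInit A)).1,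
       ((pvVlist A).foldl (pvGStep A (pvPos A)) (pvInit A)).2.1) := by
  unfold lis2_alt pvVlist pvPos pvGStep pvQStep pvInit
  simp only [PySem.List.pyRepeat_singleton, Int.toNat_natCast]

lemma pos_getD (A : List Int) (v : Int) :
    (pvPos A).getD v [] =
      (PySem.List.pyRange 0 (A.length : Int) 1).filter
        (fun i => PySem.List.pyGetD A i 0 == v) := by
  unfold pvPos
  rw [show ((PySem.List.pyRange 0 (A.length : Int) 1).foldl
        (fun d i => d.modify (PySem.List.pyGetD A i 0) [] (fun l => l ++ [i])) PySem.Dict.empty)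
      = (((PySem.List.pyRange 0 (A.length : Int) 1).map
            (fun i => (PySem.List.pyGetD A i 0, i))).foldl
          (fun d p => d.modify p.1 [] (fun l => l ++ [p.2])) PySem.Dict.empty) from
      by rw [List.foldl_map]]
  rw [PySem.Dict.getD_foldl_modify_append]
  rw [List.filter_map, List.map_map]
  simp [Function.comp_def]

lemma pos_keys_mem (A : List Int) (v : Int) :
    v ∈ (pvPos A).keys ↔
      ∃ i ∈ PySem.List.pyRange 0 (A.length : Int) 1, PySem.List.pyGetD A i 0 = v := by
  unfold pvPos
  rw [PySem.Dict.keys_foldl_modify_key]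
  rw [PySem.Dict.keys_empty]
  have hupd : PySem.Set.update ([] : List Int)
        ((PySem.List.pyRange 0 (A.length : Int) 1).map (fun i => PySem.List.pyGetD A i 0))
      = PySem.Set.ofList
        ((PySem.List.pyRange 0 (A.length : Int) 1).map (fun i => PySem.List.pyGetD A i 0)) := by
    rw [PySem.Set.ofList_eq_foldl]
    rfl
  rw [hupd, PySem.Set.mem_ofList]
  constructor
  · intro h
    rcases List.mem_map.mp h with ⟨i, hi, rfl⟩
    exact ⟨i, hi, rfl⟩
  · intro ⟨i, hi, hv⟩
    exact List.mem_map.mpr ⟨i, hi, hv⟩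

lemma pos_keys_nodup (A : List Int) : (pvPos A).keys.Nodup := by
  unfold pvPos
  exact PySem.Dict.nodup_keys_foldl_modify_key _ _ _ _ _ PySem.Dict.nodup_keys_empty

lemma vlist_mem (A : List Int) (v : Int) :
    v ∈ pvVlist A ↔ ∃ i ∈ PySem.List.pyRange 0 (A.length : Int) 1, PySem.List.pyGetD A i 0 = v := by
  unfold pvVlist
  rw [PySem.List.mem_sorted]
  exact pos_keys_mem A v

lemma vlist_sorted (A : List Int) : (pvVlist A).Pairwise (· > ·) := by
  unfold pvVlist
  have h1 := PySem.List.sorted_pairwise_rev (pvPos A).keys (fun v => v)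
  have h2 : (PySem.List.sorted (pvPos A).keys (fun v => v) true).Nodup :=
    (PySem.List.sorted_perm (pvPos A).keys (fun v => v) true).nodup_iff.mpr (pos_keys_nodup A)
  have := h1.and h2
  exact this.imp (fun {a b} h => lt_of_le_of_ne h.1 (Ne.symm h.2))

-- ---- the invariant carried through the value groups ----

def pvGfun (A : List Int) (ws : List Int) : Int → Option (Int × Int) :=
  fun j => if 0 ≤ j ∧ j < (A.length : Int) ∧ PySem.List.pyGetD A j 0 ∈ ws
    then some (PySem.List.pyGetD (pvFfin A) j 0, -j) else none

def pvInv (A : List Int) (ws : List Int) (st : List Int × List Int × PvSeg) : Prop :=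
  st.1.length = A.length ∧ st.2.1.length = A.length ∧
  (∀ j : Int, 0 ≤ j → j < (A.length : Int) →
    PySem.List.pyGetD st.1 j 0 =
      (if PySem.List.pyGetD A j 0 ∈ ws then PySem.List.pyGetD (pvFfin A) j 0 else -1)) ∧
  (∀ j : Int, 0 ≤ j → j < (A.length : Int) →
    PySem.List.pyGetD st.2.1 j 0 =
      (if PySem.List.pyGetD A j 0 ∈ ws then PySem.List.pyGetD (pvPfin A) j 0 else -1)) ∧
  pvSegOk st.2.2 0 (A.length : Int) (pvGfun A ws)

lemma pv_hcharI (A : List Int) (i : Int) (h0 : 0 ≤ i) (hi : i < (A.length : Int)) :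
    PySem.List.pyGetD (pvFfin A) i 0 = (pvRefPair A (pvFfin A) i).1 ∧
    PySem.List.pyGetD (pvPfin A) i 0 = (pvRefPair A (pvFfin A) i).2 := by
  have hc : i = (i.toNat : Int) := by omega
  rw [hc]
  exact pv_hchar A i.toNat (by omega)

lemma filterMap_eq_filter_map (g : Int → Option (Int × Int)) (p : Int → Bool)
    (f : Int → Int × Int) :
    ∀ L : List Int, (∀ j ∈ L, g j = if p j then some (f j) else none) →
      L.filterMap g = (L.filter p).map f := by
  intro L
  induction L with
  | nil => intro _; rfl
  | cons a L ih =>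
    intro h
    have ha := h a (List.mem_cons_self ..)
    have htail := ih (fun j hj => h j (List.mem_cons_of_mem _ hj))
    by_cases hp : p a = true
    · simp [List.filterMap_cons, List.filter_cons, ha, hp, htail]
    · simp [List.filterMap_cons, List.filter_cons, ha, hp, htail]

lemma query_eq_refpair (A : List Int) (ws : List Int) (t : PvSeg)
    (hok : pvSegOk t 0 (A.length : Int) (pvGfun A ws)) (i : Int) (h0 : 0 ≤ i)
    (hi : i < (A.length : Int))
    (hcond : ∀ j : Int, 0 ≤ j → j < (A.length : Int) →
      (PySem.List.pyGetD A j 0 ∈ ws ↔ PySem.List.pyGetD A j 0 > PySem.List.pyGetD A i 0)) :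
    pvQuery t 0 (A.length : Int) i =
      pvMax2 (pvCands A (pvFfin A) (PySem.List.pyGetD A i 0) (PySem.List.pyRange 0 i 1)) := by
  have hq := pvQuery_isBest t 0 (A.length : Int) i _ hok
  have hmin : min (A.length : Int) i = i := by omega
  rw [hmin] at hq
  have hlist : pvVals (pvGfun A ws) 0 i =
      pvCands A (pvFfin A) (PySem.List.pyGetD A i 0) (PySem.List.pyRange 0 i 1) := by
    rw [pvCands, PySem.List.foldl_append_ite
          (fun j => PySem.List.pyGetD A j 0 > PySem.List.pyGetD A i 0)
          (fun j => (PySem.List.pyGetD (pvFfin A) j 0, -j)), List.nil_append]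
    unfold pvVals
    apply filterMap_eq_filter_map
    intro j hj
    obtain ⟨hj0, hji⟩ := (PySem.List.mem_pyRange_one).mp hj
    unfold pvGfun
    by_cases hgt : PySem.List.pyGetD A j 0 > PySem.List.pyGetD A i 0
    · rw [if_pos ⟨hj0, by omega, (hcond j hj0 (by omega)).mpr hgt⟩,
          if_pos (by exact decide_eq_true hgt)]
    · rw [if_neg (by
          rintro ⟨-, hb, hc⟩
          exact hgt ((hcond j hj0 hb).mp hc)),
        if_neg (by simpa using hgt)]
  rw [hlist] at hq
  exact pvIsBest_unique _ _ _ hq (pvMax2_isBest _)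

lemma qpass (A : List Int) (ws : List Int) :
    ∀ (is : List Int) (st : List Int × List Int × PvSeg),
      st.1.length = A.length → st.2.1.length = A.length →
      pvSegOk st.2.2 0 (A.length : Int) (pvGfun A ws) →
      (∀ i ∈ is, 0 ≤ i ∧ i < (A.length : Int)) →
      (∀ i ∈ is, ∀ j : Int, 0 ≤ j → j < (A.length : Int) →
        (PySem.List.pyGetD A j 0 ∈ ws ↔ PySem.List.pyGetD A j 0 > PySem.List.pyGetD A i 0)) →
      (∀ i ∈ is, PySem.List.pyGetD st.1 i 0 = -1) →
      (∀ i ∈ is, PySem.List.pyGetD st.2.1 i 0 = -1) →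
      is.Nodup →
      (is.foldl (pvQStep A) st).2.2 = st.2.2 ∧
      (is.foldl (pvQStep A) st).1.length = A.length ∧
      (is.foldl (pvQStep A) st).2.1.length = A.length ∧
      (∀ j : Int, 0 ≤ j → j < (A.length : Int) →
        PySem.List.pyGetD (is.foldl (pvQStep A) st).1 j 0 =
          (if j ∈ is then PySem.List.pyGetD (pvFfin A) j 0 else PySem.List.pyGetD st.1 j 0)) ∧
      (∀ j : Int, 0 ≤ j → j < (A.length : Int) →
        PySem.List.pyGetD (is.foldl (pvQStep A) st).2.1 j 0 =
          (if j ∈ is then PySem.List.pyGetD (pvPfin A) j 0 else PySem.List.pyGetD st.2.1 j 0)) := by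
  intro is
  induction is using List.reverseRecOn with
  | nil =>
    intro st h1 h2 h3 _ _ _ _ _
    refine ⟨rfl, h1, h2, fun j _ _ => ?_, fun j _ _ => ?_⟩ <;> simp
  | append_singleton is i ih =>
    intro st h1 h2 hok his hcnd hF1 hP1 hnd
    have hmem : ∀ x ∈ is, x ∈ is ++ [i] := fun x hx => List.mem_append_left _ hx
    obtain ⟨htree, hlF, hlP, hgF, hgP⟩ := ih st h1 h2 hok
      (fun x hx => his x (hmem x hx)) (fun x hx => hcnd x (hmem x hx))
      (fun x hx => hF1 x (hmem x hx)) (fun x hx => hP1 x (hmem x hx))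
      ((List.nodup_append.mp hnd).1)
    obtain ⟨hi0, hin⟩ := his i (List.mem_append_right _ (List.mem_singleton_self i))
    have hinotpre : i ∉ is := by
      have := (List.nodup_append.mp hnd).2.2
      intro hmem'
      exact (this i hmem' i (List.mem_singleton_self i)) rfl
    rw [List.foldl_append, List.foldl_cons, List.foldl_nil]
    set st1 := is.foldl (pvQStep A) st with hst1
    have hq : pvQuery st1.2.2 0 (A.length : Int) i =
        pvMax2 (pvCands A (pvFfin A) (PySem.List.pyGetD A i 0) (PySem.List.pyRange 0 i 1)) := by
      rw [htree]
      exact query_eq_refpair A ws st.2.2 hok i hi0 hin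
        (hcnd i (List.mem_append_right _ (List.mem_singleton_self i)))
    obtain ⟨hch1, hch2⟩ := pv_hcharI A i hi0 hin
    have hiN : i = (i.toNat : Int) := by omega
    have hlF1 : i.toNat < st1.1.length := by omega
    have hlP1 : i.toNat < st1.2.1.length := by omega
    -- the value at i before this step is st.1 i (i untouched by the prefix)
    have hpreF : PySem.List.pyGetD st1.1 i 0 = PySem.List.pyGetD st.1 i 0 := by
      rw [hgF i hi0 hin, if_neg hinotpre]
    have hpreP : PySem.List.pyGetD st1.2.1 i 0 = PySem.List.pyGetD st.2.1 i 0 := by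
      rw [hgP i hi0 hin, if_neg hinotpre]
    cases hM : pvMax2 (pvCands A (pvFfin A) (PySem.List.pyGetD A i 0) (PySem.List.pyRange 0 i 1)) with
    | none =>
      have hstep : pvQStep A st1 i = st1 := by
        unfold pvQStep
        rw [hq, hM]
      rw [hstep, htree]
      have hFi : PySem.List.pyGetD (pvFfin A) i 0 = -1 := by
        rw [hch1]
        unfold pvRefPair
        rw [hM]
      have hPi : PySem.List.pyGetD (pvPfin A) i 0 = -1 := by
        rw [hch2]
        unfold pvRefPair
        rw [hM]
      refine ⟨rfl, hlF, hlP, fun j hj0 hjn => ?_, fun j hj0 hjn => ?_⟩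
      · rw [hgF j hj0 hjn]
        by_cases hji : j = i
        · rw [hji, if_neg hinotpre, if_pos (List.mem_append_right _ (List.mem_singleton_self i)), hFi]
          exact hF1 i (List.mem_append_right _ (List.mem_singleton_self i))
        · by_cases hjm : j ∈ is
          · rw [if_pos hjm, if_pos (List.mem_append_left _ hjm)]
          · rw [if_neg hjm, if_neg (by
              intro hm
              rcases List.mem_append.mp hm with h | h
              · exact hjm h
              · exact hji (by simpa using h))]
      · rw [hgP j hj0 hjn]
        by_cases hji : j = i
        · rw [hji, if_neg hinotpre, if_pos (List.mem_append_right _ (List.mem_singleton_self i)), hPi]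
          exact hP1 i (List.mem_append_right _ (List.mem_singleton_self i))
        · by_cases hjm : j ∈ is
          · rw [if_pos hjm, if_pos (List.mem_append_left _ hjm)]
          · rw [if_neg hjm, if_neg (by
              intro hm
              rcases List.mem_append.mp hm with h | h
              · exact hjm h
              · exact hji (by simpa using h))]
    | some c =>
      have hstep : pvQStep A st1 i =
          (PySem.List.pySetD st1.1 i (c.1 + 1),
           PySem.List.pySetD st1.2.1 i (-c.2), st1.2.2) := by
        unfold pvQStep
        rw [hq, hM]
      have hFi : PySem.List.pyGetD (pvFfin A) i 0 = c.1 + 1 := by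
        rw [hch1]
        unfold pvRefPair
        rw [hM]
      have hPi : PySem.List.pyGetD (pvPfin A) i 0 = -c.2 := by
        rw [hch2]
        unfold pvRefPair
        rw [hM]
      rw [hstep]
      refine ⟨htree, by simp [PySem.List.length_pySetD, hlF], by simp [PySem.List.length_pySetD, hlP],
        fun j hj0 hjn => ?_, fun j hj0 hjn => ?_⟩
      · by_cases hji : j = i
        · rw [hji, hiN, pyGetD_set_self st1.1 i.toNat (by omega) _,
            if_pos (by rw [← hiN]; exact List.mem_append_right _ (List.mem_singleton_self i)), ← hiN, hFi]
        · rw [hiN, pyGetD_set_ne st1.1 i.toNat j hj0 (by omega) _, ← hiN, hgF j hj0 hjn]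
          by_cases hjm : j ∈ is
          · rw [if_pos hjm, if_pos (List.mem_append_left _ hjm)]
          · rw [if_neg hjm, if_neg (by
              intro hm
              rcases List.mem_append.mp hm with h | h
              · exact hjm h
              · exact hji (by simpa using h))]
      · by_cases hji : j = i
        · rw [hji, hiN, pyGetD_set_self st1.2.1 i.toNat (by omega) _,
            if_pos (by rw [← hiN]; exact List.mem_append_right _ (List.mem_singleton_self i)), ← hiN, hPi]
        · rw [hiN, pyGetD_set_ne st1.2.1 i.toNat j hj0 (by omega) _, ← hiN, hgP j hj0 hjn]
          by_cases hjm : j ∈ is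
          · rw [if_pos hjm, if_pos (List.mem_append_left _ hjm)]
          · rw [if_neg hjm, if_neg (by
              intro hm
              rcases List.mem_append.mp hm with h | h
              · exact hjm h
              · exact hji (by simpa using h))]

lemma upass (A : List Int) (w : Int → Int × Int) :
    ∀ (is : List Int) (t : PvSeg) (g : Int → Option (Int × Int)),
      pvSegOk t 0 (A.length : Int) g →
      (∀ i ∈ is, 0 ≤ i ∧ i < (A.length : Int) ∧ g i = none) → is.Nodup →
      pvSegOk (is.foldl (fun t i => pvUpdate t 0 (A.length : Int) i (w i)) t) 0 (A.length : Int)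
        (fun j => if j ∈ is then some (w j) else g j) := by
  intro is
  induction is with
  | nil =>
    intro t g hok _ _
    rw [List.foldl_nil]
    exact pvSegOk_congr _ _ _ _ _ (fun j _ _ => by rw [if_neg (by simp)]) hok
  | cons i is ih =>
    intro t g hok his hnd
    obtain ⟨h0, h1, h2⟩ := his i (List.mem_cons_self ..)
    rw [List.foldl_cons]
    have h3 := pvUpdate_ok t 0 (A.length : Int) i (w i) g hok h0 h1 h2
    have h4 := ih _ _ h3
      (fun i' hi' => by
        obtain ⟨a, b, c⟩ := his i' (List.mem_cons_of_mem _ hi')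
        refine ⟨a, b, ?_⟩
        rw [if_neg (by
          intro heq
          exact (List.nodup_cons.mp hnd).1 (heq ▸ hi')), c])
      (List.nodup_cons.mp hnd).2
    refine pvSegOk_congr _ _ _ _ _ (fun j _ _ => ?_) h4
    by_cases hj : j ∈ is
    · rw [if_pos hj, if_pos (List.mem_cons_of_mem _ hj)]
    · rw [if_neg hj]
      by_cases hji : j = i
      · rw [if_pos hji, if_pos (by rw [hji]; exact List.mem_cons_self ..), hji]
      · rw [if_neg hji, if_neg (by
          intro hm
          rcases List.mem_cons.mp hm with h | h
          · exact hji h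
          · exact hj h)]

lemma gstep_inv (A : List Int) (ws : List Int) (v : Int) (rest : List Int)
    (hsplit : pvVlist A = ws ++ v :: rest) (st : List Int × List Int × PvSeg)
    (hinv : pvInv A ws st) : pvInv A (ws ++ [v]) (pvGStep A (pvPos A) st v) := by
  obtain ⟨hlF, hlP, hF, hP, hok⟩ := hinv
  have hsort := vlist_sorted A
  rw [hsplit] at hsort
  obtain ⟨hpw_ws, hpw_cons, hacross⟩ := List.pairwise_append.mp hsort
  have hwv : ∀ u ∈ ws, u > v := fun u hu => hacross u hu v (List.mem_cons_self ..)
  have hvnot : v ∉ ws := fun h => lt_irrefl v (hwv v h)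
  have hiff : ∀ j : Int, 0 ≤ j → j < (A.length : Int) →
      (PySem.List.pyGetD A j 0 ∈ ws ↔ PySem.List.pyGetD A j 0 > v) := by
    intro j h0 hj
    have hu : PySem.List.pyGetD A j 0 ∈ pvVlist A :=
      (vlist_mem A _).mpr ⟨j, (PySem.List.mem_pyRange_one).mpr ⟨h0, hj⟩, rfl⟩
    constructor
    · exact hwv _
    · intro hgt
      rw [hsplit] at hu
      rcases List.mem_append.mp hu with h | h
      · exact h
      · rcases List.mem_cons.mp h with h | h
        · exact absurd (h ▸ hgt) (lt_irrefl v)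
        · have := (List.pairwise_cons.mp hpw_cons).1 _ h
          omega
  set is := (pvPos A).getD v [] with hisdef
  have hisfilter : is = (PySem.List.pyRange 0 (A.length : Int) 1).filter
      (fun i => PySem.List.pyGetD A i 0 == v) := pos_getD A v
  have hismem : ∀ i ∈ is, 0 ≤ i ∧ i < (A.length : Int) ∧ PySem.List.pyGetD A i 0 = v := by
    intro i hi
    rw [hisfilter] at hi
    obtain ⟨hr, hb⟩ := List.mem_filter.mp hi
    obtain ⟨h0, h1⟩ := (PySem.List.mem_pyRange_one).mp hr
    exact ⟨h0, h1, by simpa using hb⟩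
  have hisnd : is.Nodup := by
    rw [hisfilter]
    exact (PySem.List.nodup_pyRange_one 0 (A.length : Int)).filter _
  have hmemis : ∀ j : Int, 0 ≤ j → j < (A.length : Int) → PySem.List.pyGetD A j 0 = v → j ∈ is := by
    intro j h0 hj hv
    rw [hisfilter]
    exact List.mem_filter.mpr ⟨(PySem.List.mem_pyRange_one).mpr ⟨h0, hj⟩, by simp [hv]⟩
  have hq := qpass A ws is st hlF hlP hok
    (fun i hi => ⟨(hismem i hi).1, (hismem i hi).2.1⟩)
    (fun i hi j h0 hj => by rw [(hismem i hi).2.2]; exact hiff j h0 hj)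
    (fun i hi => by
      rw [hF i (hismem i hi).1 (hismem i hi).2.1,
        if_neg (by rw [(hismem i hi).2.2]; exact hvnot)])
    (fun i hi => by
      rw [hP i (hismem i hi).1 (hismem i hi).2.1,
        if_neg (by rw [(hismem i hi).2.2]; exact hvnot)])
    hisnd
  obtain ⟨htree, hlF1, hlP1, hgF1, hgP1⟩ := hq
  set st1 := is.foldl (pvQStep A) st with hst1
  have hup := upass A (fun j => (PySem.List.pyGetD st1.1 j 0, -j)) is st.2.2 (pvGfun A ws) hok
    (fun i hi => ⟨(hismem i hi).1, (hismem i hi).2.1, by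
      unfold pvGfun
      rw [if_neg (by
        rintro ⟨-, -, hc⟩
        rw [(hismem i hi).2.2] at hc
        exact hvnot hc)]⟩)
    hisnd
  have hG : pvGStep A (pvPos A) st v =
      (st1.1, st1.2.1,
        is.foldl (fun t i =>
          pvUpdate t 0 (A.length : Int) i (PySem.List.pyGetD st1.1 i 0, -i)) st1.2.2) := rfl
  rw [hG]
  have hnev : ∀ j : Int, 0 ≤ j → j < (A.length : Int) → j ∉ is → PySem.List.pyGetD A j 0 ≠ v :=
    fun j h0 hj hnot hv => hnot (hmemis j h0 hj hv)
  have hmemapp : ∀ j : Int, 0 ≤ j → j < (A.length : Int) →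
      (PySem.List.pyGetD A j 0 ∈ ws ++ [v] ↔
        (PySem.List.pyGetD A j 0 ∈ ws ∨ PySem.List.pyGetD A j 0 = v)) := by
    intro j _ _
    rw [List.mem_append]
    simp
  refine ⟨hlF1, hlP1, ?_, ?_, ?_⟩
  · intro j h0 hj
    rw [hgF1 j h0 hj]
    by_cases hji : j ∈ is
    · rw [if_pos hji, if_pos ((hmemapp j h0 hj).mpr (Or.inr (hismem j hji).2.2))]
    · rw [if_neg hji, hF j h0 hj]
      by_cases hjw : PySem.List.pyGetD A j 0 ∈ ws
      · rw [if_pos hjw, if_pos ((hmemapp j h0 hj).mpr (Or.inl hjw))]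
      · rw [if_neg hjw, if_neg (by
          intro hm
          rcases (hmemapp j h0 hj).mp hm with h | h
          · exact hjw h
          · exact hnev j h0 hj hji h)]
  · intro j h0 hj
    rw [hgP1 j h0 hj]
    by_cases hji : j ∈ is
    · rw [if_pos hji, if_pos ((hmemapp j h0 hj).mpr (Or.inr (hismem j hji).2.2))]
    · rw [if_neg hji, hP j h0 hj]
      by_cases hjw : PySem.List.pyGetD A j 0 ∈ ws
      · rw [if_pos hjw, if_pos ((hmemapp j h0 hj).mpr (Or.inl hjw))]
      · rw [if_neg hjw, if_neg (by
          intro hm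
          rcases (hmemapp j h0 hj).mp hm with h | h
          · exact hjw h
          · exact hnev j h0 hj hji h)]
  · rw [htree]
    refine pvSegOk_congr _ _ _ _ _ (fun j hj0 hjn => ?_) hup
    by_cases hji : j ∈ is
    · rw [if_pos hji]
      beta_reduce
      rw [hgF1 j hj0 hjn, if_pos hji]
      unfold pvGfun
      rw [if_pos ⟨hj0, hjn, (hmemapp j hj0 hjn).mpr (Or.inr (hismem j hji).2.2)⟩]
    · rw [if_neg hji]
      unfold pvGfun
      by_cases hjw : PySem.List.pyGetD A j 0 ∈ ws
      · rw [if_pos ⟨hj0, hjn, hjw⟩, if_pos ⟨hj0, hjn, (hmemapp j hj0 hjn).mpr (Or.inl hjw)⟩]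
      · rw [if_neg (by rintro ⟨-, -, hc⟩; exact hjw hc),
          if_neg (by
            rintro ⟨-, -, hc⟩
            rcases (hmemapp j hj0 hjn).mp hc with h | h
            · exact hjw h
            · exact hnev j hj0 hjn hji h)]

lemma outer_inv (A : List Int) :
    ∀ (rest ws : List Int) (st : List Int × List Int × PvSeg),
      pvVlist A = ws ++ rest → pvInv A ws st →
      pvInv A (ws ++ rest) (rest.foldl (pvGStep A (pvPos A)) st) := by
  intro rest
  induction rest with
  | nil => intro ws st _ h; simpa using h
  | cons v rest ih =>
    intro ws st hsplit hinv
    rw [List.foldl_cons]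
    have h1 := gstep_inv A ws v rest hsplit st hinv
    have h2 := ih (ws ++ [v]) _ (by rw [hsplit, List.append_assoc]; rfl) h1
    rw [List.append_assoc] at h2
    simpa using h2

lemma init_inv (A : List Int) (hA : A ≠ []) : pvInv A [] (pvInit A) := by
  have hn : 0 < (A.length : Int) := by
    cases A with
    | nil => exact absurd rfl hA
    | cons x t => simp
  refine ⟨by simp [pvInit], by simp [pvInit], ?_, ?_, ?_⟩
  · intro j h0 hj
    have hc : j = (j.toNat : Int) := by omega
    rw [hc, PySem.List.pyGetD_natCast]
    simp only [pvInit]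
    rw [List.getD_eq_getElem _ _ (by simpa using (by omega : j.toNat < A.length))]
    simp
  · intro j h0 hj
    have hc : j = (j.toNat : Int) := by omega
    rw [hc, PySem.List.pyGetD_natCast]
    simp only [pvInit]
    rw [List.getD_eq_getElem _ _ (by simpa using (by omega : j.toNat < A.length))]
    simp
  · simp only [pvInit]
    exact pvSegOk_congr _ _ _ _ _
      (fun j h1 h2 => by unfold pvGfun; rw [if_neg (by rintro ⟨-, -, h⟩; cases h)])
      (pvBuild_ok 0 (A.length : Int) hn)

-- ===== VERDICT (by name: the statement is the Claim_ definition above) =====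
theorem lis2_spec : Claim_equal_lis2 := by
  intro A _ hpre
  unfold Spec_lis2
  have hA : 1 ≤ A.length := by
    cases A with
    | nil => exact absurd rfl hpre
    | cons x t => simp
  have hout := outer_inv A (pvVlist A) [] (pvInit A) (by simp) (init_inv A hpre)
  rw [List.nil_append] at hout
  obtain ⟨hlF, hlP, hgF, hgP, _⟩ := hout
  set S := (pvVlist A).foldl (pvGStep A (pvPos A)) (pvInit A) with hS
  obtain ⟨hlFf, hlPf⟩ := refState_len A A.length le_rfl
  have hmemv : ∀ k : Nat, k < A.length → PySem.List.pyGetD A (k : Int) 0 ∈ pvVlist A := by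
    intro k hk
    exact (vlist_mem A _).mpr ⟨(k : Int),
      (PySem.List.mem_pyRange_one).mpr ⟨by omega, by exact_mod_cast hk⟩, rfl⟩
  have hFeq : S.1 = pvFfin A := by
    apply List.ext_getElem (by rw [hlF]; unfold pvFfin; omega)
    intro k hk1 hk2
    have hkA : k < A.length := by omega
    have h1 : PySem.List.pyGetD S.1 (k : Int) 0 = PySem.List.pyGetD (pvFfin A) (k : Int) 0 := by
      rw [hgF (k : Int) (by omega) (by exact_mod_cast hkA), if_pos (hmemv k hkA)]
    rw [PySem.List.pyGetD_natCast, PySem.List.pyGetD_natCast,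
      List.getD_eq_getElem _ _ hk1, List.getD_eq_getElem _ _ hk2] at h1
    exact h1
  have hPeq : S.2.1 = pvPfin A := by
    apply List.ext_getElem (by rw [hlP]; unfold pvPfin; omega)
    intro k hk1 hk2
    have hkA : k < A.length := by omega
    have h1 : PySem.List.pyGetD S.2.1 (k : Int) 0 = PySem.List.pyGetD (pvPfin A) (k : Int) 0 := by
      rw [hgP (k : Int) (by omega) (by exact_mod_cast hkA), if_pos (hmemv k hkA)]
    rw [PySem.List.pyGetD_natCast, PySem.List.pyGetD_natCast,
      List.getD_eq_getElem _ _ hk1, List.getD_eq_getElem _ _ hk2] at h1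
    exact h1
  have hAst := (pvA_invariant A hA A.length hA le_rfl).1
  have hrep0 : List.replicate (A.length - A.length) (-1 : Int) = [] := by simp
  rw [hrep0, List.append_nil, List.append_nil] at hAst
  rw [lis2_eq, lis2_alt_eq, hAst, hFeq, hPeq]
  rfl
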